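-- pv_equiv track=rewrite | github.com/Forward-UIUC-2023S/vedaant-jain-sectioning-info-extraction | Inference/ResumeSeqTagger.py | Clean_Section
-- ===== SOURCE A (Python) =====
-- def Clean_Section(preds, start_idx, cont_idx):
--     to_change = []
--     for i in range(len(preds)-2):
--         if preds[i] == cont_idx and preds[i] == preds[i+2] and preds[i] != preds[i+1]:
--             to_change.append(i)
--     for i in to_change:
--         preds[i] = cont_idx
--
--     to_change = []
--     beg = 0
--     for i in range(len(preds)):
--         if preds[i] == cont_idx and beg == 0:
--             to_change.append(i)
--             beg = 1
--         elif preds[i] == start_idx: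
--             beg = 1
--         elif preds[i] !=start_idx:
--             beg = 0
--     for i in to_change:
--         preds[i] = start_idx
--
--     return preds
-- ===== SOURCE B (Python) =====
-- def Clean_Section(preds, start_idx, cont_idx):
--     # run-length decomposition: find each maximal run of cont_idx and rewrite
--     # every other element of the run to start_idx, starting at the first
--     # element unless the run is immediately preceded by start_idx.
--     n = len(preds)
--     i = 0
--     while i < n:
--         if preds[i] != cont_idx:
--             i += 1
--         else:
--             j = i
--             while j < n and preds[j] == cont_idx:
--                 j += 1
--             k = i + 1 if (i > 0 and preds[i-1] == start_idx) else i
--             while k < j: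
--                 preds[k] = start_idx
--                 k += 2
--             i = j
--     return preds
-- ===== Notes on version B (the rewrite author's own statement) =====
-- stated objective: alternative
-- what changed: Replaces A's two staged mark-then-rewrite sweeps (A's first loop is a verified no-op, its second is a beg-flag state machine that collects indices and rewrites them afterwards) by a run-length decomposition: B jumps from one maximal run of cont_idx to the next and rewrites every other element of each run to start_idx by parity, skipping the run's first element iff it is preceded by start_idx.
import Mathlib
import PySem

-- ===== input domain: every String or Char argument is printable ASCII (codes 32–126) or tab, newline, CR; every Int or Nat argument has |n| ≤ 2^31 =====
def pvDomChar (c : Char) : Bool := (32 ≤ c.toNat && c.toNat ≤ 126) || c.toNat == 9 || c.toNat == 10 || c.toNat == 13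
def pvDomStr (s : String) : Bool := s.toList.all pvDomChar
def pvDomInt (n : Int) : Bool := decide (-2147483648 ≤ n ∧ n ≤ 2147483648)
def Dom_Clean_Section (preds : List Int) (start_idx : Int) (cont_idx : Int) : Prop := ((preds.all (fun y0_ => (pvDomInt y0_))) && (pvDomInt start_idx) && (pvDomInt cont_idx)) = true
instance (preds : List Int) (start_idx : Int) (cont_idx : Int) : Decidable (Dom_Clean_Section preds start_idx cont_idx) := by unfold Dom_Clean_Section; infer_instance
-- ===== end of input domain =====

-- B replaces A's two staged mark-then-rewrite passes by a run-length decomposition: it locates each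
-- maximal run of cont_idx and rewrites every other run element to start_idx by parity (alternative).
-- Both Pythons mutate `preds` in place and return it; the mutation performed is the same, the theorems are about the return value.

-- ===== PORT A =====
def Clean_Section (preds : List Int) (start_idx : Int) (cont_idx : Int) : List Int :=
  -- first loop: collect i with preds[i]==cont_idx and preds[i]==preds[i+2] and preds[i]!=preds[i+1]
  let to_change1 : List Int :=
    (PySem.List.pyRange 0 ((preds.length : Int) - 2) 1).foldl
      (fun acc i =>
        if PySem.List.pyGetD preds i 0 = cont_idx ∧
           PySem.List.pyGetD preds i 0 = PySem.List.pyGetD preds (i + 2) 0 ∧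
           PySem.List.pyGetD preds i 0 ≠ PySem.List.pyGetD preds (i + 1) 0
        then acc ++ [i] else acc) []
  -- for i in to_change: preds[i] = cont_idx
  let preds1 := to_change1.foldl (fun l i => PySem.List.pySetD l i cont_idx) preds
  -- second loop: collect, tracking beg
  let st :=
    (PySem.List.pyRange 0 (preds1.length : Int) 1).foldl
      (fun (s : List Int × Int) i =>
        if PySem.List.pyGetD preds1 i 0 = cont_idx ∧ s.2 = 0 then (s.1 ++ [i], 1)
        else if PySem.List.pyGetD preds1 i 0 = start_idx then (s.1, 1)
        else if PySem.List.pyGetD preds1 i 0 ≠ start_idx then (s.1, 0)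
        else s) ([], 0)
  -- for i in to_change: preds[i] = start_idx
  st.1.foldl (fun l i => PySem.List.pySetD l i start_idx) preds1

-- ===== PORT B =====
-- the inner `while k < j: preds[k] = start_idx; k += 2` rewrite of a run: when skip is true the
-- current element is kept (rewriting starts one further on), otherwise it is replaced by start_idx
def CSalt (s : Int) : Bool → List Int → List Int
  | _, [] => []
  | true, x :: xs => x :: CSalt s false xs
  | false, _ :: xs => s :: CSalt s true xs

-- outer while loop of B: walk the list; on a cont_idx, split off the maximal run, rewrite it by
-- parity (skipping the first element iff the previous element was start_idx), continue after it
-- fuel = number of remaining positions, only to make the recursion structural (each step consumes ≥ 1 element)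
def CSrun (s c : Int) : Nat → List Int → Option Int → List Int
  | 0, _, _ => []
  | _, [], _ => []
  | fuel + 1, p :: rest, prev =>
    if p = c then
      CSalt s (prev == some s) ((p :: rest).takeWhile (fun x => decide (x = c)))
        ++ CSrun s c fuel ((p :: rest).dropWhile (fun x => decide (x = c))) (some c)
    else p :: CSrun s c fuel rest (some p)

def Clean_Section_alt (preds : List Int) (start_idx : Int) (cont_idx : Int) : List Int :=
  CSrun start_idx cont_idx preds.length preds none

-- ===== PRECONDITION & SPEC =====
def Spec_Clean_Section (preds : List Int) (start_idx : Int) (cont_idx : Int) (out : List Int) : Prop := out = Clean_Section_alt preds start_idx cont_idx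
instance (preds : List Int) (start_idx : Int) (cont_idx : Int) (out : List Int) : Decidable (Spec_Clean_Section preds start_idx cont_idx out) := by unfold Spec_Clean_Section; infer_instance

-- ===== CLAIM (what is proved, stated in full; the proofs are below) =====
def Claim_equal_Clean_Section : Prop := ∀ (preds : List Int) (start_idx : Int) (cont_idx : Int), Dom_Clean_Section preds start_idx cont_idx → Spec_Clean_Section preds start_idx cont_idx (Clean_Section preds start_idx cont_idx)

-- ===== LEMMAS AND PROOFS =====

-- proof-only reference state machine: A's second phase as one functional sweep
def CSgo (start_idx cont_idx beg : Int) : List Int → List Int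
  | [] => []
  | p :: rest =>
    if p = cont_idx ∧ beg = 0 then start_idx :: CSgo start_idx cont_idx 1 rest
    else if p = start_idx then p :: CSgo start_idx cont_idx 1 rest
    else p :: CSgo start_idx cont_idx 0 rest

-- folding identity steps is the identity
theorem CS_foldl_id (g : List Int → Int → List Int) (l : List Int) :
    ∀ tc : List Int, (∀ i ∈ tc, g l i = l) → tc.foldl g l = l := by
  intro tc
  induction tc with
  | nil => intro _; rfl
  | cons i rest ih =>
    intro h
    simp only [List.foldl_cons, h i (List.mem_cons_self)]
    exact ih (fun j hj => h j (List.mem_cons_of_mem _ hj))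

-- A's first rewrite loop is a no-op: every collected index already holds cont_idx
theorem CS_phase1_noop (preds : List Int) (cont_idx : Int) :
    ((PySem.List.pyRange 0 ((preds.length : Int) - 2) 1).foldl
      (fun acc i =>
        if PySem.List.pyGetD preds i 0 = cont_idx ∧
           PySem.List.pyGetD preds i 0 = PySem.List.pyGetD preds (i + 2) 0 ∧
           PySem.List.pyGetD preds i 0 ≠ PySem.List.pyGetD preds (i + 1) 0
        then acc ++ [i] else acc) []).foldl
      (fun l i => PySem.List.pySetD l i cont_idx) preds = preds := by
  rw [PySem.List.foldl_append_ite_eq_filter]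
  apply CS_foldl_id
  intro i hi
  simp only [List.nil_append, List.mem_filter, decide_eq_true_eq] at hi
  obtain ⟨hmem, hc, -, -⟩ := hi
  have hr := (PySem.List.mem_pyRange_one).1 hmem
  have h0 : 0 ≤ i := hr.1
  have hlt : i < (preds.length : Int) := by omega
  have hlt' : i.toNat < preds.length := by omega
  rw [PySem.List.pySetD_of_nonneg _ _ h0]
  rw [PySem.List.pyGetD_eq_getElem _ _ h0 hlt] at hc
  rw [← hc]
  exact List.set_getElem_self hlt'

-- applying pySetD at in-range indices distributes over ++ on the left part
theorem CS_apply_append (v : Int) (l2 : List Int) :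
    ∀ (tc l1 : List Int), (∀ i ∈ tc, 0 ≤ i ∧ i < (l1.length : Int)) →
    tc.foldl (fun l i => PySem.List.pySetD l i v) (l1 ++ l2)
      = tc.foldl (fun l i => PySem.List.pySetD l i v) l1 ++ l2 := by
  intro tc
  induction tc with
  | nil => intro l1 _; rfl
  | cons i rest ih =>
    intro l1 h
    obtain ⟨h0, hlt⟩ := h i (List.mem_cons_self)
    simp only [List.foldl_cons]
    rw [PySem.List.pySetD_of_nonneg _ _ h0, PySem.List.pySetD_of_nonneg _ _ h0,
        List.set_append_left _ _ (by omega)]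
    exact ih _ (fun j hj => by
      have := h j (List.mem_cons_of_mem _ hj)
      simpa [List.length_set] using this)

-- folding pySetD preserves length
theorem CS_apply_length (v : Int) :
    ∀ (tc l : List Int),
    (tc.foldl (fun l i => PySem.List.pySetD l i v) l).length = l.length := by
  intro tc
  induction tc with
  | nil => intro l; rfl
  | cons i rest ih =>
    intro l
    simp only [List.foldl_cons]
    rw [ih, PySem.List.length_pySetD]

-- main invariant of A's second phase: applying the collected indices equals the reference sweep
theorem CS_main (start_idx cont_idx : Int) :
    ∀ (suf pre tc : List Int) (beg : Int),
    (∀ i ∈ tc, 0 ≤ i ∧ i < (pre.length : Int)) →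
    (((PySem.List.pyRange (pre.length : Int) ((pre ++ suf).length : Int) 1).foldl
        (fun (s : List Int × Int) i =>
          if PySem.List.pyGetD (pre ++ suf) i 0 = cont_idx ∧ s.2 = 0 then (s.1 ++ [i], 1)
          else if PySem.List.pyGetD (pre ++ suf) i 0 = start_idx then (s.1, 1)
          else if PySem.List.pyGetD (pre ++ suf) i 0 ≠ start_idx then (s.1, 0)
          else s) (tc, beg)).1).foldl
      (fun l i => PySem.List.pySetD l i start_idx) (pre ++ suf)
      = tc.foldl (fun l i => PySem.List.pySetD l i start_idx) pre ++ CSgo start_idx cont_idx beg suf := by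
  intro suf
  induction suf with
  | nil =>
    intro pre tc beg h
    have hnil : PySem.List.pyRange (pre.length : Int) ((pre ++ []).length : Int) 1 = [] := by
      apply PySem.List.pyRange_one_eq_nil; simp
    rw [hnil]
    simp only [List.foldl_nil, List.append_nil, CSgo]
  | cons p rest ih =>
    intro pre tc beg h
    have hlen : ((pre ++ p :: rest).length : Int) = (pre.length : Int) + 1 + rest.length := by
      simp; omega
    have hcons : PySem.List.pyRange (pre.length : Int) ((pre ++ p :: rest).length : Int) 1
        = (pre.length : Int) :: PySem.List.pyRange ((pre.length : Int) + 1) ((pre ++ p :: rest).length : Int) 1 := by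
      apply PySem.List.pyRange_one_cons; omega
    have hget : PySem.List.pyGetD (pre ++ p :: rest) (pre.length : Int) 0 = p := by
      rw [PySem.List.pyGetD_eq_getElem _ _ (by omega) (by omega)]
      simp
    have hP : pre ++ p :: rest = (pre ++ [p]) ++ rest := by simp
    have hplen : (((pre ++ [p]).length : Int)) = (pre.length : Int) + 1 := by simp
    rw [hcons]
    simp only [List.foldl_cons, hget]
    by_cases hc1 : p = cont_idx ∧ beg = 0
    · simp only [if_pos hc1]
      have key := ih (pre ++ [p]) (tc ++ [(pre.length : Int)]) 1
        (by intro i hi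
            rcases List.mem_append.1 hi with hi | hi
            · have := h i hi; exact ⟨this.1, by simp; omega⟩
            · simp only [List.mem_singleton] at hi; subst hi
              exact ⟨by omega, by simp⟩)
      rw [hplen] at key
      rw [hP]
      rw [key]
      have htc : ∀ i ∈ tc, 0 ≤ i ∧ i < ((tc.foldl (fun l i => PySem.List.pySetD l i start_idx) pre).length : Int) := by
        intro i hi; have := h i hi; rwa [CS_apply_length]
      rw [List.foldl_append]
      simp only [List.foldl_cons, List.foldl_nil]
      rw [CS_apply_append start_idx [p] tc pre h]
      have hlenf : (tc.foldl (fun l i => PySem.List.pySetD l i start_idx) pre).length = pre.length :=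
        CS_apply_length start_idx tc pre
      rw [PySem.List.pySetD_of_nonneg _ _ (by omega)]
      have : ((pre.length : Int)).toNat = (tc.foldl (fun l i => PySem.List.pySetD l i start_idx) pre).length := by
        rw [hlenf]; simp
      rw [this, List.set_append_right _ _ (le_refl _)]
      simp [CSgo, hc1]
    · simp only [if_neg hc1]
      by_cases hc2 : p = start_idx
      · simp only [if_pos hc2]
        have key := ih (pre ++ [p]) tc 1
          (by intro i hi; have := h i hi; exact ⟨this.1, by simp; omega⟩)
        rw [hplen] at key
        rw [hP, key, CS_apply_append start_idx [p] tc pre h]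
        simp [CSgo, hc2]
      · simp only [if_neg hc2, if_pos hc2]
        have key := ih (pre ++ [p]) tc 0
          (by intro i hi; have := h i hi; exact ⟨this.1, by simp; omega⟩)
        rw [hplen] at key
        rw [hP, key, CS_apply_append start_idx [p] tc pre h]
        simp [CSgo, hc2]
        tauto

-- A's port equals the reference sweep started with beg = 0
theorem CS_A_eq_go (preds : List Int) (start_idx cont_idx : Int) :
    Clean_Section preds start_idx cont_idx = CSgo start_idx cont_idx 0 preds := by
  unfold Clean_Section
  simp only []
  rw [CS_phase1_noop preds cont_idx]
  have := CS_main start_idx cont_idx preds [] [] 0 (by simp)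
  simpa only [List.nil_append, List.foldl_nil, List.length_nil, Nat.cast_zero] using this

-- sweeping past a non-cont element: the outcome does not depend on the incoming beg
theorem CSgo_ne_head (s c b p : Int) (t : List Int) (hp : p ≠ c) :
    CSgo s c b (p :: t) = p :: CSgo s c (if p = s then 1 else 0) t := by
  simp only [CSgo]
  by_cases hs : p = s <;> simp [hs, hp]

-- when cont = start, sweeping a cont element keeps its value and sets beg to 1, whatever beg was
theorem CSgo_cs_head (s c b : Int) (t : List Int) (hcs : c = s) :
    CSgo s c b (c :: t) = c :: CSgo s c 1 t := by
  simp only [CSgo]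
  by_cases hb : b = 0 <;> simp [hb, hcs]

-- when cont = start, the sweep leaves a nonempty run of cont unchanged and exits with beg = 1
theorem CSgo_cs_run (s c : Int) (hcs : c = s) :
    ∀ (run : List Int), run ≠ [] → (∀ x ∈ run, x = c) → ∀ (t : List Int) (b : Int),
    CSgo s c b (run ++ t) = run ++ CSgo s c 1 t := by
  intro run
  induction run with
  | nil => intro h; exact absurd rfl h
  | cons x xs ih =>
    intro _ hall t b
    have hx : x = c := hall x (List.mem_cons_self)
    subst hx
    rw [List.cons_append, CSgo_cs_head s x b _ hcs]
    rcases xs with _ | ⟨y, ys⟩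
    · simp
    · rw [ih (by simp) (fun z hz => hall z (List.mem_cons_of_mem _ hz)) t 1]
      simp
  
-- when cont = start, alternate rewriting of a cont-run is the identity
theorem CSalt_id (s c : Int) (hcs : c = s) :
    ∀ (sk : Bool) (run : List Int), (∀ x ∈ run, x = c) → CSalt s sk run = run := by
  intro sk run
  induction run generalizing sk with
  | nil => intro _; cases sk <;> rfl
  | cons x xs ih =>
    intro hall
    have hx : x = c := hall x (List.mem_cons_self)
    have hall' := fun z hz => hall z (List.mem_cons_of_mem _ hz)
    cases sk
    · simp only [CSalt, ih true hall']
      rw [hx, hcs]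
    · simp only [CSalt, ih false hall']

-- when cont ≠ start, sweeping a cont-run is exactly alternate rewriting, for some exit beg
theorem CSgo_run (s c : Int) (hcs : c ≠ s) :
    ∀ (run : List Int), (∀ x ∈ run, x = c) → ∀ (t : List Int) (b : Int),
    ∃ b', CSgo s c b (run ++ t) = CSalt s (decide (b ≠ 0)) run ++ CSgo s c b' t := by
  intro run
  induction run with
  | nil => intro _ t b; exact ⟨b, by cases h : decide (b ≠ 0) <;> simp [CSalt]⟩
  | cons x xs ih =>
    intro hall t b
    have hx : x = c := hall x (List.mem_cons_self)
    have hall' := fun z hz => hall z (List.mem_cons_of_mem _ hz)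
    by_cases hb : b = 0
    · obtain ⟨b', hb'⟩ := ih hall' t 1
      have hb1 : CSgo s c 1 (xs ++ t) = CSalt s true xs ++ CSgo s c b' t := by
        simpa using hb'
      refine ⟨b', ?_⟩
      have hcond : x = c ∧ b = 0 := ⟨hx, hb⟩
      have hd : decide (b ≠ 0) = false := by simp [hb]
      simp only [List.cons_append, CSgo, if_pos hcond, hd, CSalt, hb1]
    · obtain ⟨b', hb'⟩ := ih hall' t 0
      have hb0 : CSgo s c 0 (xs ++ t) = CSalt s false xs ++ CSgo s c b' t := by
        simpa using hb'
      refine ⟨b', ?_⟩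
      have h1 : ¬ (x = c ∧ b = 0) := fun h => hb h.2
      have hxs : x ≠ s := by rw [hx]; exact hcs
      have hd : decide (b ≠ 0) = true := by simp [hb]
      simp only [List.cons_append, CSgo, if_neg h1, if_neg hxs, hd, CSalt, hb0]

-- the head of a dropWhile result falsifies the predicate
theorem CS_head_dropWhile (P : Int → Bool) :
    ∀ (l : List Int) (q : Int) (t : List Int), l.dropWhile P = q :: t → P q = false := by
  intro l
  induction l with
  | nil => intro q t h; simp [List.dropWhile] at h
  | cons x xs ih =>
    intro q t h
    rw [List.dropWhile_cons] at h
    split at h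
    · exact ih q t h
    · cases h; simpa using ‹¬ P x = true›

-- everything takeWhile keeps satisfies the predicate (specialised to equality with c)
theorem CS_mem_takeWhile (c : Int) (l : List Int) :
    ∀ x ∈ l.takeWhile (fun x => decide (x = c)), x = c := by
  intro x hx
  have := List.mem_takeWhile_imp hx
  simpa using this

-- B's run walker equals the reference sweep, given the beg/previous-element compatibility
theorem CSrun_eq_CSgo (s c : Int) :
    ∀ (n : Nat) (l : List Int), l.length ≤ n → ∀ (prev : Option Int) (b : Int),
    (∀ p t, l = p :: t → p = c → c ≠ s → b = (if prev = some s then 1 else 0)) →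
    CSrun s c n l prev = CSgo s c b l := by
  intro n
  induction n with
  | zero =>
    intro l hl prev b _
    have : l = [] := List.eq_nil_of_length_eq_zero (Nat.le_zero.1 hl)
    subst this
    rfl
  | succ m ih =>
    intro l hl prev b hcompat
    rcases l with _ | ⟨p, rest⟩
    · rfl
    by_cases hp : p = c
    · rw [CSrun]
      simp only [if_pos hp]
      set run := (p :: rest).takeWhile (fun x => decide (x = c)) with hrun
      set rest' := (p :: rest).dropWhile (fun x => decide (x = c)) with hrest'
      have hsplit : run ++ rest' = p :: rest := List.takeWhile_append_dropWhile
      have hallrun : ∀ x ∈ run, x = c := CS_mem_takeWhile c (p :: rest)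
      have hrunne : run ≠ [] := by
        rw [hrun, List.takeWhile_cons]
        simp [hp]
      have hrest'len : rest'.length ≤ m := by
        rw [hrest', List.dropWhile_cons]
        have hd : decide (p = c) = true := by simp [hp]
        rw [hd]
        simp only [if_true]
        have := List.length_dropWhile_le (fun x => decide (x = c)) rest
        simp at hl; omega
      have hcompat' : ∀ (b'' : Int), ∀ q t, rest' = q :: t → q = c → c ≠ s →
          b'' = (if (some c : Option Int) = some s then 1 else 0) := by
        intro b'' q t hqt hqc _
        exfalso
        have := CS_head_dropWhile (fun x => decide (x = c)) (p :: rest) q t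
          (by rw [← hrest']; exact hqt)
        simp [hqc] at this
      by_cases hcs : c = s
      · rw [CSalt_id s c hcs _ _ hallrun]
        rw [ih rest' hrest'len (some c) 1 (hcompat' 1)]
        conv_rhs => rw [← hsplit]
        rw [CSgo_cs_run s c hcs run hrunne hallrun rest' b]
      · have hb : b = (if prev = some s then 1 else 0) :=
          hcompat p rest rfl hp hcs
        obtain ⟨b', hgo⟩ := CSgo_run s c hcs run hallrun rest' b
        rw [ih rest' hrest'len (some c) b' (hcompat' b')]
        conv_rhs => rw [← hsplit]
        rw [hgo]
        congr 2
        by_cases hps : prev = some s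
        · simp [hps, hb]
        · have hpe : (prev == some s) = false := beq_eq_false_iff_ne.2 hps
          rw [hpe, hb, if_neg hps]
          decide
    · rw [CSrun]
      simp only [if_neg hp]
      rw [CSgo_ne_head s c b p rest hp]
      congr 1
      apply ih rest (by simp at hl; omega) (some p)
      intro q t _ hqc hcs
      by_cases hps : p = s <;> simp [hps]

-- ===== VERDICT (by name: the statement is the Claim_ definition above) =====
theorem Clean_Section_spec : Claim_equal_Clean_Section := by
  intro preds start_idx cont_idx _
  unfold Spec_Clean_Section Clean_Section_alt
  rw [CS_A_eq_go]
  rw [CSrun_eq_CSgo start_idx cont_idx preds.length preds (le_refl _) none 0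
      (by intro p t _ _ _; simp)]
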